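-- pv_equiv track=rewrite | github.com/alyssating/CS101-APTs | APT6/BordaCount.py | winners
-- ===== SOURCE A (Python) =====
-- def winners(ballot):
--     """
--     return list of winners based on votes
--     in list ballot
--     """
--
-- # adding all candidates to the dictionary
--     dict = {}
--     for elm in ballot:
--         lst = elm.split()
--         for i in range(len(lst)):
--             dict[lst[i]] = 0
--
-- # adding up the points for each candidate based on their position in the list
--     for elm in ballot:
--         lst2 = elm.split()
--         for i in range(len(lst2)):
--             dict[lst2[i]] += len(lst2) - i
--     lstVotes = sorted(dict.items(), key = lambda x: -x[-1])
--
-- # adding the winners to the return list, also checking if there is more than one winner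
--     ret = []
--     for elm in lstVotes:
--             ret.append(elm[0])
--     return sorted(ret)
-- ===== SOURCE B (Python) =====
-- def winners(ballot):
--     """
--     return list of winners based on votes
--     in list ballot
--     """
--     # A's returned list is just all unique candidate names sorted alphabetically
--     # (the score computation never affects the output), so collect the unique
--     # tokens in a set and sort them.
--     cands = set()
--     for elm in ballot:
--         cands.update(elm.split())
--     return sorted(cands)
-- ===== Notes on version B (the rewrite author's own statement) =====
-- stated objective: simpler
-- what changed: A's score dictionary, point accumulation and score-based sort are dead code with respect to the returned value (the final sorted() re-sorts all dict keys alphabetically); B drops them and just collects the unique tokens in a set and sorts once.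
import Mathlib
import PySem

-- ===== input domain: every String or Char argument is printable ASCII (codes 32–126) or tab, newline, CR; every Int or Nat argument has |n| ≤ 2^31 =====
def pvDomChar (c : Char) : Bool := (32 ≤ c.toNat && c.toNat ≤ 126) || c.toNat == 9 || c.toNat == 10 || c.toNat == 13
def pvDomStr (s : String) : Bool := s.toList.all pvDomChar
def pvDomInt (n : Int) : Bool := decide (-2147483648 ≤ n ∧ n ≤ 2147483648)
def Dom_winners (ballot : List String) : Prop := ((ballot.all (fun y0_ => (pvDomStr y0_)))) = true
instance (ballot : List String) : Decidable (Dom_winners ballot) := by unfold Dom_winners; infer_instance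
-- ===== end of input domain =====

-- B drops A's dead score dictionary/accumulation/score sort and just collects the unique tokens and sorts them (objective: simpler).

-- ===== PORT A =====
def winners (ballot : List String) : List String :=
  -- dict = {}; for elm in ballot: lst = elm.split(); for i in range(len(lst)): dict[lst[i]] = 0
  let d : PySem.Dict String Int :=
    ballot.foldl (fun d elm =>
      let lst := PySem.Str.split₀ elm
      (PySem.List.pyRange 0 (PySem.List.len lst)).foldl
        (fun d i => d.insert (PySem.List.pyGetD lst i "") 0) d)
      PySem.Dict.empty
  -- for elm in ballot: lst2 = elm.split(); for i in range(len(lst2)): dict[lst2[i]] += len(lst2) - i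
  -- (every lst2[i] was inserted by the first loop, so Python's KeyError branch is unreachable; modify with default is exact here)
  let d2 : PySem.Dict String Int :=
    ballot.foldl (fun d elm =>
      let lst2 := PySem.Str.split₀ elm
      (PySem.List.pyRange 0 (PySem.List.len lst2)).foldl
        (fun d i => d.modify (PySem.List.pyGetD lst2 i "") 0 (· + ((PySem.List.len lst2 : Int) - i))) d)
      d
  -- lstVotes = sorted(dict.items(), key = lambda x: -x[-1])
  let lstVotes := PySem.List.sorted d2.items (fun x => -x.2)
  -- ret = []; for elm in lstVotes: ret.append(elm[0]); return sorted(ret)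
  let ret := lstVotes.foldl (fun acc elm => acc ++ [elm.1]) []
  PySem.List.sorted ret (fun x => x)

-- ===== PORT B =====
def winners_alt (ballot : List String) : List String :=
  -- cands = set(); for elm in ballot: cands.update(elm.split()); return sorted(cands)
  let cands := ballot.foldl (fun s elm => PySem.Set.update s (PySem.Str.split₀ elm)) (PySem.Set.ofList [])
  PySem.List.sorted cands (fun x => x)

-- ===== PRECONDITION & SPEC =====
def Spec_winners (ballot : List String) (out : List String) : Prop := out = winners_alt ballot
instance (ballot : List String) (out : List String) : Decidable (Spec_winners ballot out) := by unfold Spec_winners; infer_instance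

-- ===== CLAIM (what is proved, stated in full; the proofs are below) =====
def Claim_equal_winners : Prop := ∀ (ballot : List String), Dom_winners ballot → Spec_winners ballot (winners ballot)

-- ===== LEMMAS AND PROOFS =====

-- keys of A's first (insert) loop: membership and nodup, by induction on ballot
theorem winners_keys_insert_mem (ballot : List String) (d : PySem.Dict String Int) (x : String) :
    x ∈ (ballot.foldl (fun d elm =>
      (PySem.List.pyRange 0 (PySem.List.len (PySem.Str.split₀ elm))).foldl
        (fun d i => d.insert (PySem.List.pyGetD (PySem.Str.split₀ elm) i "") 0) d) d).keys ↔
    x ∈ d.keys ∨ x ∈ ballot.flatMap (fun e => PySem.Str.split₀ e) := by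
  induction ballot generalizing d with
  | nil => simp
  | cons e t ih =>
    simp only [List.foldl_cons, List.flatMap_cons, ih]
    rw [PySem.Dict.keys_foldl_insert_key _ (fun i => PySem.List.pyGetD (PySem.Str.split₀ e) i "") _ d,
        PySem.List.map_pyGetD_pyRange_zero]
    simp [PySem.Set.mem_update, or_assoc, List.mem_append]

theorem winners_keys_modify_mem (ballot : List String) (d : PySem.Dict String Int) (x : String) :
    x ∈ (ballot.foldl (fun d elm =>
      (PySem.List.pyRange 0 (PySem.List.len (PySem.Str.split₀ elm))).foldl
        (fun d i => d.modify (PySem.List.pyGetD (PySem.Str.split₀ elm) i "") 0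
          (· + ((PySem.List.len (PySem.Str.split₀ elm) : Int) - i))) d) d).keys ↔
    x ∈ d.keys ∨ x ∈ ballot.flatMap (fun e => PySem.Str.split₀ e) := by
  induction ballot generalizing d with
  | nil => simp
  | cons e t ih =>
    simp only [List.foldl_cons, List.flatMap_cons, ih]
    rw [PySem.Dict.keys_foldl_modify_key _ (fun i => PySem.List.pyGetD (PySem.Str.split₀ e) i "") 0 _ d,
        PySem.List.map_pyGetD_pyRange_zero]
    simp [PySem.Set.mem_update, or_assoc, List.mem_append]

theorem winners_keys_insert_nodup (ballot : List String) (d : PySem.Dict String Int)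
    (h : d.keys.Nodup) :
    (ballot.foldl (fun d elm =>
      (PySem.List.pyRange 0 (PySem.List.len (PySem.Str.split₀ elm))).foldl
        (fun d i => d.insert (PySem.List.pyGetD (PySem.Str.split₀ elm) i "") 0) d) d).keys.Nodup := by
  induction ballot generalizing d with
  | nil => exact h
  | cons e t ih =>
    exact ih _ (PySem.Dict.nodup_keys_foldl_insert_key _ _ _ _ h)

theorem winners_keys_modify_nodup (ballot : List String) (d : PySem.Dict String Int)
    (h : d.keys.Nodup) :
    (ballot.foldl (fun d elm =>
      (PySem.List.pyRange 0 (PySem.List.len (PySem.Str.split₀ elm))).foldl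
        (fun d i => d.modify (PySem.List.pyGetD (PySem.Str.split₀ elm) i "") 0
          (· + ((PySem.List.len (PySem.Str.split₀ elm) : Int) - i))) d) d).keys.Nodup := by
  induction ballot generalizing d with
  | nil => exact h
  | cons e t ih =>
    exact ih _ (PySem.Dict.nodup_keys_foldl_modify_key _ _ _ _ _ h)

-- B's set: membership and nodup
theorem winners_set_mem (ballot : List String) (s : PySem.Set String) (x : String) :
    x ∈ ballot.foldl (fun s elm => PySem.Set.update s (PySem.Str.split₀ elm)) s ↔
    x ∈ s ∨ x ∈ ballot.flatMap (fun e => PySem.Str.split₀ e) := by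
  induction ballot generalizing s with
  | nil => simp
  | cons e t ih =>
    simp [List.foldl_cons, ih, PySem.Set.mem_update, or_assoc]

theorem winners_set_nodup (ballot : List String) (s : PySem.Set String) (h : List.Nodup s) :
    List.Nodup (ballot.foldl (fun s elm => PySem.Set.update s (PySem.Str.split₀ elm)) s) := by
  induction ballot generalizing s with
  | nil => exact h
  | cons e t ih => exact ih _ (PySem.Set.nodup_update _ _ h)

-- ===== VERDICT (by name: the statement is the Claim_ definition above) =====
theorem winners_spec : Claim_equal_winners := by
  intro ballot _
  unfold Spec_winners winners winners_alt
  simp only []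
  -- name the pieces
  set d1 := ballot.foldl (fun d elm =>
      (PySem.List.pyRange 0 (PySem.List.len (PySem.Str.split₀ elm))).foldl
        (fun d i => d.insert (PySem.List.pyGetD (PySem.Str.split₀ elm) i "") 0) d)
      (PySem.Dict.empty : PySem.Dict String Int) with hd1
  set d2 := ballot.foldl (fun d elm =>
      (PySem.List.pyRange 0 (PySem.List.len (PySem.Str.split₀ elm))).foldl
        (fun d i => d.modify (PySem.List.pyGetD (PySem.Str.split₀ elm) i "") 0
          (· + ((PySem.List.len (PySem.Str.split₀ elm) : Int) - i))) d) d1 with hd2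
  set cands := ballot.foldl (fun s elm => PySem.Set.update s (PySem.Str.split₀ elm))
      (PySem.Set.ofList ([] : List String)) with hc
  rw [PySem.List.foldl_append_singleton_eq_map, List.nil_append]
  apply PySem.List.sorted_eq_sorted_of_perm _ _ _ (fun a b h => h)
  have hperm : (PySem.List.sorted d2.items (fun x => -x.2)).Perm d2.items :=
    PySem.List.sorted_perm _ _ _
  have hmapperm : ((PySem.List.sorted d2.items (fun x => -x.2)).map Prod.fst).Perm d2.keys :=
    hperm.map Prod.fst
  have hkeysnodup : d2.keys.Nodup := by
    rw [hd2]
    exact winners_keys_modify_nodup _ _ (winners_keys_insert_nodup _ _ (by simp [PySem.Dict.keys, PySem.Dict.empty]))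
  have hnodup1 : ((PySem.List.sorted d2.items (fun x => -x.2)).map Prod.fst).Nodup :=
    (hmapperm.nodup_iff).mpr hkeysnodup
  have hnodup2 : List.Nodup cands := by
    rw [hc]; exact winners_set_nodup _ _ (by simp [PySem.Set.ofList])
  refine (List.perm_ext_iff_of_nodup hnodup1 hnodup2).mpr fun a => ?_
  rw [hmapperm.mem_iff]
  rw [hd2, hc]
  rw [winners_keys_modify_mem, winners_keys_insert_mem, winners_set_mem]
  simp [PySem.Dict.keys, PySem.Dict.empty, PySem.Set.ofList]
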